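-- pv_equiv track=rewrite | github.com/nuheajiohc/algorithm-study | 프로그래머스/lv2/42584. 주식가격/주식가격.py | solution
-- ===== SOURCE A (Python) =====
-- def solution(prices):
--     length = len(prices)
--     # 모든 가격 max값으로 세팅
--     result = [ i for i in range (length - 1, -1, -1)]
--
--     # 주식 가격이 떨어지는 경우를 찾아 수정
--     stack = []
--     for i in range (length):
--         while stack and prices[stack[-1]] > prices[i]:
--             j = stack.pop()
--             result[j] = i - j
--         stack.append(i)
--     return result
-- ===== SOURCE B (Python) =====
-- def solution(prices):
--     # Naive repeated forward scan: for each day, walk forward through the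
--     # remaining prices counting seconds until the price strictly drops.
--     result = []
--     for i in range(len(prices)):
--         cnt = 0
--         for p in prices[i + 1:]:
--             cnt += 1
--             if p < prices[i]:
--                 break
--         result.append(cnt)
--     return result
-- ===== Notes on version B (the rewrite author's own statement) =====
-- stated objective: simpler
-- what changed: Replaced A's single-pass backward-resolving monotonic stack (which pre-fills the answer with maxima and patches resolved indices) by the plain nested forward scan: for each day count seconds until a strictly smaller price appears.
import Mathlib
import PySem

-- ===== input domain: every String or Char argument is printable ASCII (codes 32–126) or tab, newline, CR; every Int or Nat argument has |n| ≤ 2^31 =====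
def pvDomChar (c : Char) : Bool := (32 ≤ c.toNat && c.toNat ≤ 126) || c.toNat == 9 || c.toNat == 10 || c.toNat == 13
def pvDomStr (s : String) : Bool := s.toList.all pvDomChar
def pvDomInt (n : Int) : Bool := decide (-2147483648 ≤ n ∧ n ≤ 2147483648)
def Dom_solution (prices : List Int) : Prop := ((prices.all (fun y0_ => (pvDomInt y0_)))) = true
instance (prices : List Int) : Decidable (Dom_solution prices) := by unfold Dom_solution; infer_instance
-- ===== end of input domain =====

-- B replaces A's single-pass monotonic-stack resolution by the plain nested forward scan (simpler decomposition, not faster).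

-- ===== PORT A =====
-- the inner `while stack and prices[stack[-1]] > prices[i]` loop; the indices held in the
-- stack come from `range(length)` and are always in range, so `getD _ 0` is exact here
def popA (prices : List Int) (i : Nat) : List Nat → List Int → List Nat × List Int
  | [], res => ([], res)
  | j :: st, res =>
    if prices.getD j 0 > prices.getD i 0 then
      popA prices i st (res.set j ((i : Int) - (j : Int)))
    else (j :: st, res)

def solution (prices : List Int) : List Int :=
  let length := prices.length
  -- result = [i for i in range(length - 1, -1, -1)]
  let result := PySem.List.pyRange ((length : Int) - 1) (-1) (-1)
  -- for i in range(length): while …: pop / result[j] = i - j; stack.append(i)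
  (((List.range length).foldl
      (fun (s : List Nat × List Int) i =>
        let t := popA prices i s.1 s.2
        (i :: t.1, t.2))
      ([], result))).2

-- ===== PORT B =====
-- `cnt` accumulation of the inner `for p in prices[i+1:]` loop of Source B
def cntB (x : Int) : List Int → Int
  | [] => 0
  | y :: ys => if y < x then 1 else 1 + cntB x ys

def solution_alt : List Int → List Int
  | [] => []
  | x :: xs => cntB x xs :: solution_alt xs

-- ===== PRECONDITION & SPEC =====
def Spec_solution (prices : List Int) (out : List Int) : Prop := out = solution_alt prices
instance (prices : List Int) (out : List Int) : Decidable (Spec_solution prices out) := by unfold Spec_solution; infer_instance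

-- ===== CLAIM (what is proved, stated in full; the proofs are below) =====
def Claim_equal_solution : Prop := ∀ (prices : List Int), Dom_solution prices → Spec_solution prices (solution prices)

-- ===== LEMMAS AND PROOFS =====
def Pj (prices : List Int) (j : Nat) : Int := prices.getD j 0
def firstDrop (prices : List Int) (j : Nat) : Option Nat :=
  (List.range prices.length).find? (fun k => decide (j < k) && decide (Pj prices k < Pj prices j))
def stkQ (prices : List Int) (i j : Nat) : Bool :=
  (List.range i).all (fun k => !(decide (j < k)) || decide (Pj prices j ≤ Pj prices k))
def stkDef (prices : List Int) (i : Nat) : List Nat :=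
  ((List.range i).filter (stkQ prices i)).reverse

theorem find?_range_eq_some {p : Nat → Bool} {n b : Nat} :
    (List.range n).find? p = some b ↔ b < n ∧ p b = true ∧ ∀ a < b, ¬ p a = true := by
  rw [List.find?_eq_some_iff_append]
  constructor
  · rintro ⟨hpb, as, bs, heq, hfail⟩
    have hbn : b < n := by
      have : b ∈ List.range n := by rw [heq]; simp
      simpa using this
    have hlen : as.length < n := by
      have := congrArg List.length heq
      simp at this; omega
    have hb : b = as.length := by
      have h1 : (List.range n)[as.length]? = some as.length := by
        simp [List.getElem?_range hlen]
      rw [heq] at h1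
      simp at h1
      omega
    have has : as = List.range b := by
      have h1 : (as ++ b :: bs).take as.length = as := List.take_left ..
      rw [← heq, List.take_range] at h1
      rw [← h1, hb]; congr 1; omega
    refine ⟨hbn, hpb, fun a ha => by simpa using hfail a (by rw [has]; simpa using ha)⟩
  · rintro ⟨hbn, hpb, hfail⟩
    refine ⟨hpb, List.range b, List.range' (b+1) (n-(b+1)), ?_, fun a ha => by
      simpa using hfail a (by simpa using ha)⟩
    have h2 : List.range' b (n-b) = b :: List.range' (b+1) (n-(b+1)) := by
      have : n - b = (n - (b+1)) + 1 := by omega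
      rw [this, List.range'_succ]
    rw [List.range_eq_range', ← h2]
    have := @List.range'_append 0 b (n-b) 1
    simp at this
    rw [List.range_eq_range'] at *
    rw [this]
    congr 1; omega

theorem firstDrop_some {prices : List Int} {j k : Nat} (h : firstDrop prices j = some k) :
    k < prices.length ∧ j < k ∧ Pj prices k < Pj prices j := by
  rw [firstDrop, find?_range_eq_some] at h
  obtain ⟨h1, h2, _⟩ := h
  simp at h2
  exact ⟨h1, h2.1, h2.2⟩


theorem firstDrop_first {prices : List Int} {j k m : Nat} (h : firstDrop prices j = some k)
    (h1 : j < m) (h2 : m < k) : ¬ Pj prices m < Pj prices j := by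
  rw [firstDrop, find?_range_eq_some] at h
  have := h.2.2 m h2
  simp at this
  exact fun hlt => absurd hlt (not_lt.2 (this h1))

theorem firstDrop_eq_some {prices : List Int} {j i : Nat} (hi : i < prices.length)
    (hji : j < i) (hd : Pj prices i < Pj prices j)
    (hq : ∀ m, j < m → m < i → Pj prices j ≤ Pj prices m) :
    firstDrop prices j = some i := by
  rw [firstDrop, find?_range_eq_some]
  refine ⟨hi, by simp [hji, hd], fun a ha => by
    simp only [Bool.not_eq_true, Bool.and_eq_false_iff, decide_eq_false_iff_not]
    by_cases hja : j < a
    · exact Or.inr (by simpa using hq a hja ha)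
    · exact Or.inl (by simpa using hja)⟩

theorem firstDrop_none_iff {prices : List Int} {j : Nat} :
    firstDrop prices j = none ↔ ∀ k, j < k → k < prices.length → ¬ Pj prices k < Pj prices j := by
  rw [firstDrop, List.find?_eq_none]
  constructor
  · intro h k h1 h2
    have := h k (by simpa using h2)
    simp at this
    exact fun hlt => absurd hlt (not_lt.2 (this h1))
  · intro h k hk
    simp only [Bool.not_eq_true, Bool.and_eq_false_iff, decide_eq_false_iff_not]
    by_cases hjk : j < k
    · exact Or.inr (by simpa using h k hjk (by simpa using hk))
    · exact Or.inl (by simpa using hjk)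

theorem stkQ_iff {prices : List Int} {i j : Nat} :
    stkQ prices i j = true ↔ ∀ k, j < k → k < i → Pj prices j ≤ Pj prices k := by
  rw [stkQ, List.all_eq_true]
  constructor
  · intro h k h1 h2
    have hh := h k (by simpa using h2)
    simp at hh
    rcases hh with hh | hh
    · omega
    · exact hh
  · intro h k hk
    simp only [Bool.or_eq_true, Bool.not_eq_eq_eq_not, Bool.not_true, decide_eq_false_iff_not,
      decide_eq_true_eq]
    by_cases hjk : j < k
    · exact Or.inr (h k hjk (by simpa using hk))
    · exact Or.inl hjk

theorem mem_stkDef {prices : List Int} {i j : Nat} :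
    j ∈ stkDef prices i ↔ j < i ∧ stkQ prices i j = true := by
  simp [stkDef, List.mem_filter]

theorem stkDef_pairwise (prices : List Int) (i : Nat) :
    (stkDef prices i).Pairwise (fun a b => Pj prices b ≤ Pj prices a) := by
  have h1 : ((List.range i).filter (stkQ prices i)).Pairwise (· < ·) :=
    (List.pairwise_lt_range).sublist List.filter_sublist
  have h2 : ((List.range i).filter (stkQ prices i)).Pairwise
      (fun a b => Pj prices a ≤ Pj prices b) := by
    refine List.Pairwise.imp_of_mem ?_ h1
    intro a b ha hb hab
    have haq : stkQ prices i a = true := (List.mem_filter.1 ha).2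
    have hbi : b < i := by simpa using (List.mem_filter.1 hb).1
    exact stkQ_iff.1 haq b hab hbi
  rw [stkDef, List.pairwise_reverse]
  exact h2


theorem popA_spec (prices : List Int) (i : Nat) :
    ∀ (st : List Nat) (res : List Int),
      st.Pairwise (fun a b => Pj prices b ≤ Pj prices a) →
      popA prices i st res =
        (st.filter (fun j => !(decide (Pj prices i < Pj prices j))),
         (st.filter (fun j => decide (Pj prices i < Pj prices j))).foldl
            (fun r j => r.set j ((i : Int) - (j : Int))) res) := by
  intro st
  induction st with
  | nil => intro res _; simp [popA]
  | cons j st ih =>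
    intro res hpw
    rw [popA]
    by_cases hc : Pj prices i < Pj prices j
    · rw [if_pos (by simpa [Pj] using hc)]
      rw [ih _ (List.pairwise_cons.1 hpw).2]
      simp [hc]
    · rw [if_neg (by simpa [Pj] using hc)]
      have hall : ∀ b ∈ st, ¬ Pj prices i < Pj prices b := by
        intro b hb
        have := (List.pairwise_cons.1 hpw).1 b hb
        intro h; exact hc (lt_of_lt_of_le h this)
      have h1 : (j :: st).filter (fun j => !(decide (Pj prices i < Pj prices j))) = j :: st := by
        rw [List.filter_eq_self]
        intro b hb
        rcases List.mem_cons.1 hb with rfl | hb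
        · simpa using hc
        · simpa using hall b hb
      have h2 : (j :: st).filter (fun j => decide (Pj prices i < Pj prices j)) = [] := by
        rw [List.filter_eq_nil_iff]
        intro b hb
        rcases List.mem_cons.1 hb with rfl | hb
        · simpa using hc
        · simpa using hall b hb
      simp [h1, h2]

theorem foldl_set_getElem? (f : Nat → Int) :
    ∀ (l : List Nat) (res : List Int) (m : Nat),
      (∀ j ∈ l, j < res.length) →
      (l.foldl (fun r j => r.set j (f j)) res)[m]? =
        if m ∈ l then some (f m) else res[m]? := by
  intro l
  induction l with
  | nil => simp
  | cons j l ih =>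
    intro res m hlen
    rw [List.foldl_cons, ih _ m (by intro a ha; simpa using hlen a (by simp [ha]))]
    by_cases hm : m ∈ l
    · simp [hm]
    · simp only [hm, if_false, List.mem_cons, List.getElem?_set]
      by_cases hj : m = j
      · subst hj
        simp [hlen m (by simp)]
      · simp [hj, Ne.symm hj]

def resDef (prices : List Int) (i : Nat) : List Int :=
  (List.range prices.length).map (fun j =>
    match firstDrop prices j with
    | some k => if k < i then (k : Int) - (j : Int) else (prices.length : Int) - 1 - (j : Int)
    | none => (prices.length : Int) - 1 - (j : Int))

theorem resDef_getElem? {prices : List Int} {i j : Nat} (hj : j < prices.length) :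
    (resDef prices i)[j]? = some (match firstDrop prices j with
      | some k => if k < i then (k : Int) - (j : Int) else (prices.length : Int) - 1 - (j : Int)
      | none => (prices.length : Int) - 1 - (j : Int)) := by
  simp [resDef, List.getElem?_map, List.getElem?_range, hj]

theorem stkDef_succ (prices : List Int) (i : Nat) :
    stkDef prices (i + 1) =
      i :: (stkDef prices i).filter (fun j => !(decide (Pj prices i < Pj prices j))) := by
  have hqi : stkQ prices (i+1) i = true := by
    rw [stkQ_iff]; intro k h1 h2; omega
  have hcong : (List.range i).filter (stkQ prices (i+1)) =
      (List.range i).filter (fun j => !(decide (Pj prices i < Pj prices j)) && stkQ prices i j) := by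
    apply List.filter_congr
    intro j hj
    have hji : j < i := by simpa using hj
    rw [Bool.eq_iff_iff]
    simp only [Bool.and_eq_true, Bool.not_eq_eq_eq_not, Bool.not_true, decide_eq_false_iff_not]
    rw [stkQ_iff, stkQ_iff]
    constructor
    · intro h
      exact ⟨not_lt.2 (h i hji (by omega)), fun k h1 h2 => h k h1 (by omega)⟩
    · rintro ⟨h1, h2⟩ k hk1 hk2
      by_cases hki : k < i
      · exact h2 k hk1 hki
      · have : k = i := by omega
        subst this; exact not_lt.1 h1
  rw [stkDef, List.range_succ, List.filter_append, List.reverse_append]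
  simp only [List.filter_cons, hqi, if_pos, List.filter_nil]
  rw [hcong, stkDef, List.filter_reverse, List.filter_filter]
  simp

theorem resDef_succ (prices : List Int) (i : Nat) (hi : i < prices.length) :
    ((stkDef prices i).filter (fun j => decide (Pj prices i < Pj prices j))).foldl
        (fun r j => r.set j ((i : Int) - (j : Int))) (resDef prices i) =
      resDef prices (i + 1) := by
  apply List.ext_getElem?
  intro m
  rw [foldl_set_getElem? (fun j => (i : Int) - (j : Int))]
  · by_cases hm : m ∈ (stkDef prices i).filter (fun j => decide (Pj prices i < Pj prices j))
    · have h1 := (List.mem_filter.1 hm).1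
      have h2 : Pj prices i < Pj prices m := by simpa using (List.mem_filter.1 hm).2
      obtain ⟨hmi, hQ⟩ := mem_stkDef.1 h1
      have hfd : firstDrop prices m = some i :=
        firstDrop_eq_some hi hmi h2 (fun k hk1 hk2 => stkQ_iff.1 hQ k hk1 hk2)
      rw [if_pos hm, resDef_getElem? (by omega), hfd]
      simp
    · rw [if_neg hm]
      by_cases hmn : m < prices.length
      · rw [resDef_getElem? hmn, resDef_getElem? hmn]
        rcases hfd : firstDrop prices m with _ | k
        · rfl
        · have hki : k ≠ i := by
            rintro rfl
            obtain ⟨_, hjk, hlt⟩ := firstDrop_some hfd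
            apply hm
            rw [List.mem_filter]
            refine ⟨mem_stkDef.2 ⟨hjk, stkQ_iff.2 ?_⟩, by simpa using hlt⟩
            intro a ha1 ha2
            exact not_lt.1 (firstDrop_first hfd ha1 ha2)
          have : (k < i + 1) ↔ (k < i) := by omega
          simp [this]
      · have hl1 : (resDef prices i).length ≤ m := by rw [resDef]; simpa using not_lt.1 hmn
        have hl2 : (resDef prices (i+1)).length ≤ m := by rw [resDef]; simpa using not_lt.1 hmn
        rw [List.getElem?_eq_none hl1, List.getElem?_eq_none hl2]
  · intro j hj
    have := (mem_stkDef.1 (List.mem_filter.1 hj).1).1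
    rw [resDef]
    simp
    omega

theorem resDef_zero (prices : List Int) :
    resDef prices 0 = PySem.List.pyRange ((prices.length : Int) - 1) (-1) (-1) := by
  rw [PySem.List.pyRange_neg_one, resDef]
  have hn : (((prices.length : Int) - 1) - (-1)).toNat = prices.length := by omega
  rw [hn]
  apply List.map_congr_left
  intro j hj
  rcases hfd : firstDrop prices j with _ | k
  · ring
  · simp only [Nat.not_lt_zero, if_false]

theorem loop_inv (prices : List Int) :
    ∀ i, i ≤ prices.length →
      (List.range i).foldl
        (fun (s : List Nat × List Int) i =>
          let t := popA prices i s.1 s.2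
          (i :: t.1, t.2))
        ([], PySem.List.pyRange ((prices.length : Int) - 1) (-1) (-1)) =
      (stkDef prices i, resDef prices i) := by
  intro i
  induction i with
  | zero =>
    intro _
    rw [← resDef_zero]
    simp [stkDef]
  | succ i ih =>
    intro hle
    rw [List.range_succ, List.foldl_append, ih (by omega), List.foldl_cons, List.foldl_nil]
    simp only
    rw [popA_spec prices i _ _ (stkDef_pairwise prices i)]
    rw [← stkDef_succ, ← resDef_succ prices i (by omega)]

def specOut (prices : List Int) (j : Nat) : Int :=
  match firstDrop prices j with
  | some k => (k : Int) - (j : Int)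
  | none => (prices.length : Int) - 1 - (j : Int)


theorem solution_eq_spec (prices : List Int) :
    solution prices = (List.range prices.length).map (specOut prices) := by
  rw [solution]
  simp only
  rw [loop_inv prices prices.length (le_refl _)]
  rw [resDef]
  apply List.map_congr_left
  intro j hj
  rcases hfd : firstDrop prices j with _ | k
  · simp [specOut, hfd]
  · have := (firstDrop_some hfd).1
    simp [specOut, hfd, this]

theorem solution_alt_length (l : List Int) : (solution_alt l).length = l.length := by
  induction l with
  | nil => rfl
  | cons x xs ih => simp [solution_alt, ih]

theorem solution_alt_getElem? (l : List Int) :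
    ∀ j, j < l.length → (solution_alt l)[j]? = some (cntB (l.getD j 0) (l.drop (j+1))) := by
  induction l with
  | nil => intro j hj; simp at hj
  | cons x xs ih =>
    intro j hj
    cases j with
    | zero => simp [solution_alt]
    | succ j =>
      rw [solution_alt]
      rw [List.getElem?_cons_succ]
      rw [ih j (by simpa using hj)]
      simp

theorem cntB_eq (x : Int) :
    ∀ (xs : List Int), cntB x xs =
      match (List.range xs.length).find? (fun m => decide (xs.getD m 0 < x)) with
      | some m => (m : Int) + 1
      | none => (xs.length : Int) := by
  intro xs
  induction xs with
  | nil => simp [cntB]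
  | cons y ys ih =>
    rw [cntB]
    have hr : List.range (y :: ys).length = 0 :: (List.range ys.length).map Nat.succ := by
      simp [List.range_succ_eq_map]
    rw [hr, List.find?_cons]
    by_cases hy : y < x
    · simp [hy]
    · have hp : (decide ((y :: ys).getD 0 0 < x)) = false := by simpa using hy
      rw [hp]
      rw [List.find?_map]
      have hcomp : ((fun m => decide ((y :: ys).getD m 0 < x)) ∘ Nat.succ)
          = fun m => decide (ys.getD m 0 < x) := by
        funext m; simp [Function.comp]
      rw [hcomp, if_neg hy, ih]
      rcases h : (List.range ys.length).find? (fun m => decide (ys.getD m 0 < x)) with _ | m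
      · simp [h]; ring
      · simp [h]; push_cast; ring

theorem cntB_drop_eq_specOut (prices : List Int) (j : Nat) (hj : j < prices.length) :
    cntB (prices.getD j 0) (prices.drop (j+1)) = specOut prices j := by
  rw [cntB_eq]
  have hdl : (prices.drop (j+1)).length = prices.length - (j+1) := by simp
  have hgd : ∀ m, (prices.drop (j+1)).getD m 0 = prices.getD (j+1+m) 0 := by
    intro m; simp [List.getD, List.getElem?_drop]
  rcases hfd : firstDrop prices j with _ | k
  · have hnone : (List.range (prices.drop (j+1)).length).find?
        (fun m => decide ((prices.drop (j+1)).getD m 0 < prices.getD j 0)) = none := by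
      rw [List.find?_eq_none]
      intro a ha
      have ha' : a < prices.length - (j+1) := by rw [← hdl]; simpa using ha
      rw [hgd]
      simp only [Bool.not_eq_true, decide_eq_false_iff_not]
      exact firstDrop_none_iff.1 hfd (j+1+a) (by omega) (by omega)
    rw [hnone]
    simp only [specOut, hfd, hdl]
    omega
  · obtain ⟨hkn, hjk, hlt⟩ := firstDrop_some hfd
    have hsome : (List.range (prices.drop (j+1)).length).find?
        (fun m => decide ((prices.drop (j+1)).getD m 0 < prices.getD j 0)) = some (k-(j+1)) := by
      rw [find?_range_eq_some]
      refine ⟨by omega, ?_, ?_⟩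
      · rw [hgd]
        have : j+1+(k-(j+1)) = k := by omega
        rw [this]
        simpa [Pj] using hlt
      · intro a ha
        rw [hgd]
        simp only [Bool.not_eq_true, decide_eq_false_iff_not]
        exact firstDrop_first hfd (by omega) (by omega)
    rw [hsome]
    simp only [specOut, hfd]
    rw [Nat.cast_sub (by omega : j+1 ≤ k)]
    push_cast
    ring

theorem solution_alt_eq_spec (prices : List Int) :
    solution_alt prices = (List.range prices.length).map (specOut prices) := by
  apply List.ext_getElem?
  intro j
  by_cases hj : j < prices.length
  · rw [solution_alt_getElem? prices j hj, cntB_drop_eq_specOut prices j hj]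
    simp [List.getElem?_map, List.getElem?_range, hj]
  · rw [List.getElem?_eq_none (by rw [solution_alt_length]; omega),
        List.getElem?_eq_none (by simp; omega)]

-- ===== VERDICT (by name: the statement is the Claim_ definition above) =====
theorem solution_spec : Claim_equal_solution := by
  intro prices _
  unfold Spec_solution
  rw [solution_eq_spec, solution_alt_eq_spec]
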